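-- pv_equiv track=rewrite | github.com/revhea2/priority-based-resource-allocation | variant_diskstras_algorithm.py | get_maximum_band
-- ===== SOURCE A (Python) =====
-- def get_maximum_band(band, s):
--     max_index = -1
--     max_value = -1
--     for index, value in enumerate(band):
--         if index in s and max_value < value:
--             max_value = value
--             max_index = index
--
--     return max_index
-- ===== SOURCE B (Python) =====
-- def get_maximum_band(band, s):
--     n = len(band)
--     best_index = -1
--     best_value = -1
--     for i in sorted(set(s)):
--         if 0 <= i < n and best_value < band[i]:
--             best_value = band[i]
--             best_index = i
--     return best_index
-- ===== Notes on version B (the rewrite author's own statement) =====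
-- stated objective: alternative
-- what changed: B iterates over sorted(set(s)) in ascending order with a range guard instead of scanning the whole band and testing 'index in s' at every position.
import Mathlib
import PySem

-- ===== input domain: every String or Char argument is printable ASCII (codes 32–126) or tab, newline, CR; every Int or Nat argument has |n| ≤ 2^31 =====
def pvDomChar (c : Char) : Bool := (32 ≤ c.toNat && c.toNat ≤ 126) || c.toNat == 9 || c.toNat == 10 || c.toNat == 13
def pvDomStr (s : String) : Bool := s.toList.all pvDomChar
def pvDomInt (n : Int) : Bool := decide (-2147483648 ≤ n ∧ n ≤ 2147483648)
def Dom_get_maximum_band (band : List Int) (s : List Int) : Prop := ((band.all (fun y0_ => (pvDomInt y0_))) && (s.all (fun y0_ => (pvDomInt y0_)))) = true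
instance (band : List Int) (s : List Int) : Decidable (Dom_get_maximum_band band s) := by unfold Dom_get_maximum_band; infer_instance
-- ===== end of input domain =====

-- B replaces A's scan of the whole band (with a linear 'index in s' test at each position)
-- by a loop over sorted(set(s)) with a range guard; return values are proved identical.

-- ===== PORT A =====
def get_maximum_band (band : List Int) (s : List Int) : Int :=
  ((PySem.List.enumerate band).foldl
    (fun st iv => if iv.1 ∈ s ∧ st.2 < iv.2 then (iv.1, iv.2) else st)
    (-1, -1)).1

-- ===== PORT B =====
def get_maximum_band_alt (band : List Int) (s : List Int) : Int :=
  ((PySem.List.sorted (PySem.Set.ofList s) (fun x => x) false).foldl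
    (fun st i => if (0 ≤ i ∧ i < (band.length : Int)) ∧ st.2 < PySem.List.pyGetD band i 0
      then (i, PySem.List.pyGetD band i 0) else st)
    (-1, -1)).1

-- ===== PRECONDITION & SPEC =====
def Spec_get_maximum_band (band : List Int) (s : List Int) (out : Int) : Prop := out = get_maximum_band_alt band s
instance (band : List Int) (s : List Int) (out : Int) : Decidable (Spec_get_maximum_band band s out) := by unfold Spec_get_maximum_band; infer_instance

-- ===== CLAIM (what is proved, stated in full; the proofs are below) =====
def Claim_equal_get_maximum_band : Prop := ∀ (band : List Int) (s : List Int), Dom_get_maximum_band band s → Spec_get_maximum_band band s (get_maximum_band band s)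

-- ===== LEMMAS AND PROOFS =====

-- the common pure step, on an index known to be admissible
def pvStep (band : List Int) (st : Int × Int) (i : Int) : Int × Int :=
  if st.2 < PySem.List.pyGetD band i 0 then (i, PySem.List.pyGetD band i 0) else st

-- A's fold equals the pure step folded over the in-range indices that are members of s
theorem pvA_fold (band : List Int) (s : List Int) :
    (PySem.List.enumerate band).foldl
      (fun st iv => if iv.1 ∈ s ∧ st.2 < iv.2 then (iv.1, iv.2) else st) (-1, -1)
    = ((PySem.List.pyRange 0 (PySem.List.len band) 1).filter (fun i => decide (i ∈ s))).foldl
        (pvStep band) (-1, -1) := by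
  rw [PySem.List.enumerate_eq_map_pyRange band 0, List.foldl_map]
  rw [← PySem.List.foldl_ite_eq_foldl_filter (fun i => i ∈ s) (pvStep band)]
  apply PySem.List.foldl_congr_mem
  intro st i _
  by_cases h2 : i ∈ s <;> by_cases h3 : st.2 < PySem.List.pyGetD band i 0 <;>
    simp [pvStep, h2, h3]

-- B's fold equals the pure step folded over the in-range members of sorted(set(s))
theorem pvB_fold (band : List Int) (s : List Int) :
    (PySem.List.sorted (PySem.Set.ofList s) (fun x => x) false).foldl
      (fun st i => if (0 ≤ i ∧ i < (band.length : Int)) ∧ st.2 < PySem.List.pyGetD band i 0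
        then (i, PySem.List.pyGetD band i 0) else st) (-1, -1)
    = ((PySem.List.sorted (PySem.Set.ofList s) (fun x => x) false).filter
        (fun i => decide (0 ≤ i ∧ i < (band.length : Int)))).foldl (pvStep band) (-1, -1) := by
  rw [← PySem.List.foldl_ite_eq_foldl_filter (fun i => 0 ≤ i ∧ i < (band.length : Int)) (pvStep band)]
  apply PySem.List.foldl_congr_mem
  intro st i _
  by_cases h2 : 0 ≤ i ∧ i < (band.length : Int) <;> by_cases h3 : st.2 < PySem.List.pyGetD band i 0 <;>
    simp [pvStep, h2, h3]

-- the two candidate-index lists coincide: same members, both strictly increasing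
theorem pvLists_eq (band : List Int) (s : List Int) :
    ((PySem.List.pyRange 0 (PySem.List.len band) 1).filter (fun i => decide (i ∈ s)))
    = ((PySem.List.sorted (PySem.Set.ofList s) (fun x => x) false).filter
        (fun i => decide (0 ≤ i ∧ i < (band.length : Int)))) := by
  have hA : ((PySem.List.pyRange 0 (PySem.List.len band) 1).filter (fun i => decide (i ∈ s))).Pairwise (· < ·) :=
    (PySem.List.pairwise_lt_pyRange_one 0 band.length).filter _
  have hB : ((PySem.List.sorted (PySem.Set.ofList s) (fun x => x) false).filter
      (fun i => decide (0 ≤ i ∧ i < (band.length : Int)))).Pairwise (· < ·) :=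
    (PySem.List.sorted_ofList_pairwise_lt s).filter _
  have hperm : ((PySem.List.pyRange 0 (PySem.List.len band) 1).filter (fun i => decide (i ∈ s))).Perm
      ((PySem.List.sorted (PySem.Set.ofList s) (fun x => x) false).filter
        (fun i => decide (0 ≤ i ∧ i < (band.length : Int)))) := by
    rw [List.perm_ext_iff_of_nodup (hA.imp ne_of_lt) (hB.imp ne_of_lt)]
    intro i
    simp only [List.mem_filter, PySem.List.mem_pyRange_one, PySem.List.mem_sorted,
      PySem.Set.mem_ofList, decide_eq_true_eq]
    tauto
  exact PySem.List.eq_of_perm_of_pairwise_le_of_injective (fun x => x)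
    (fun _ _ h => h) hperm (hA.imp le_of_lt) (hB.imp le_of_lt)

-- ===== VERDICT (by name: the statement is the Claim_ definition above) =====
theorem get_maximum_band_spec : Claim_equal_get_maximum_band := by
  intro band s _
  unfold Spec_get_maximum_band get_maximum_band get_maximum_band_alt
  rw [pvA_fold, pvB_fold, pvLists_eq]
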